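-- pv_equiv track=rewrite | github.com/hydraxic/NurikabeGen | nurikabegen.py | correct_island_size
-- ===== SOURCE A (Python) =====
-- def get_neighbours(x, y):
--     # return all neighbours of a cell
--     return [(x + 1, y), (x - 1, y), (x, y + 1), (x, y - 1)];
--
-- def check_in_bounds(grid, x, y):
--     # check if a neighboured cell is within the bounds of the grid
--     return x >= 0 and y >= 0 and x < len(grid) and y < len(grid[0]);
--
-- def flood_fill_island_count(grid, x, y, visited, cellType, wrongType):
--     stack = [(x, y)];
--     visited[x][y] = True;
--     count = 1 # to include the starting numbered cell
--
--     while stack: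
--         (cx, cy) = stack.pop();
--
--         # check all neighbours
--         for (Nx, Ny) in get_neighbours(cx, cy):
--             # if the neighbour is within bounds, not visited, and is the same cell type (water)
--             if check_in_bounds(grid, Nx, Ny) and not visited[Nx][Ny]:
--                 if grid[Nx][Ny] == cellType:
--                     stack.append((Nx, Ny));
--                     visited[Nx][Ny] = True;
--                     count += 1;
--                 elif not wrongType == None and grid[Nx][Ny] == wrongType:
--                     return -1;
--
--     return count;
--
-- def correct_island_size(grid):
--     visited = [[False for _ in range(len(grid[0]))] for _ in range(len(grid))]
--
--     for i in range(len(grid)):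
--         for j in range(len(grid[0])):
--             if grid[i][j] > 0 and not visited[i][j]: # if the cell is a numbered cell and not visited
--                 count = flood_fill_island_count(grid, i, j, visited, 0, None);
--                 if count != grid[i][j]: # if the count of cells in island is not equal to the number on the cell
--                     return False;
--
--     return True;
-- ===== SOURCE B (Python) =====
-- def correct_island_size(grid):
--     rows, cols = len(grid), len(grid[0])
--     visited = [[False] * cols for _ in range(rows)]
--
--     def flood(x, y):
--         # claim every eligible (in-bounds, unvisited, water) neighbour, then
--         # explore each claimed cell recursively; returns #cells newly claimed
--         claimed = []
--         for nx, ny in ((x, y - 1), (x, y + 1), (x - 1, y), (x + 1, y)):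
--             if 0 <= nx < rows and 0 <= ny < cols and not visited[nx][ny] and grid[nx][ny] == 0:
--                 visited[nx][ny] = True
--                 claimed.append((nx, ny))
--         total = len(claimed)
--         for cx, cy in claimed:
--             total += flood(cx, cy)
--         return total
--
--     for i in range(rows):
--         for j in range(cols):
--             if grid[i][j] > 0 and not visited[i][j]:
--                 visited[i][j] = True
--                 if 1 + flood(i, j) != grid[i][j]:
--                     return False
--     return True
-- ===== Notes on version B (the rewrite author's own statement) =====
-- stated objective: simpler
-- what changed: The explicit stack and while-loop of the flood fill are replaced by call-stack recursion: a nested flood(x, y) claims (marks) every eligible neighbour and then recurses into each claimed cell, returning the number of cells claimed; the stack data structure, the pop/push protocol and the helper functions get_neighbours/check_in_bounds disappear.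
-- outside the precondition, e.g. on correct_island_size([]): A returns True, B raises IndexError; on correct_island_size([[1, 0], [7, 7], [0]]): A returns False, B returns False
import Mathlib
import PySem

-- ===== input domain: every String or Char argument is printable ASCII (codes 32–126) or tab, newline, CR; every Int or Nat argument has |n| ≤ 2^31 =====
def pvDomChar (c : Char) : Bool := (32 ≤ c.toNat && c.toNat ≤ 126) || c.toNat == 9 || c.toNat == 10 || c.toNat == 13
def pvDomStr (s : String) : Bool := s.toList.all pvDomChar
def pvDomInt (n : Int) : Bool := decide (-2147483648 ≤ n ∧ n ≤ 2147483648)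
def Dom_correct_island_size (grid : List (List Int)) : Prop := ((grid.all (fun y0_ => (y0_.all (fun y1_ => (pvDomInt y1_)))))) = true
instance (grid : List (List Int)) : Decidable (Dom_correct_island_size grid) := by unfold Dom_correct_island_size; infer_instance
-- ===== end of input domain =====

-- B replaces A's explicit stack by call-stack recursion (claim eligible neighbours, then recurse
-- into each), which is shorter and plainer; equal return value on Pre_, proved below.

-- Shared low-level subscript helpers (Python's grid[x][y], visited[x][y], visited[x][y]=True).
-- pyGet? returns none exactly where Python raises IndexError; the .getD default is only reachable
-- outside Pre_correct_island_size (both programs only subscript after an in-bounds check).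
def gval (grid : List (List Int)) (x y : Int) : Int :=
  ((PySem.List.pyGet? grid x).bind (fun r => PySem.List.pyGet? r y)).getD 0

def vget (v : List (List Bool)) (x y : Int) : Bool :=
  ((PySem.List.pyGet? v x).bind (fun r => PySem.List.pyGet? r y)).getD false

-- visited[x][y] = True; exact for the nonnegative in-bounds indices at which both Pythons assign
def vset (v : List (List Bool)) (x y : Int) : List (List Bool) :=
  v.modify x.toNat (fun r => r.set y.toNat true)

-- ===== PORT A =====
def get_neighbours (x y : Int) : List (Int × Int) :=
  [(x + 1, y), (x - 1, y), (x, y + 1), (x, y - 1)]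

-- len(grid[0]) raises on grid = [] in Python (excluded by Pre_); headI gives [] there
def check_in_bounds (grid : List (List Int)) (x y : Int) : Bool :=
  decide (0 ≤ x) && decide (0 ≤ y) && decide (x < (grid.length : Int)) &&
    decide (y < (grid.headI.length : Int))

-- one neighbour of the for-loop body; .inl v = the 'return -1' early exit was taken
def neighbourStepA (grid : List (List Int)) (cellType : Int) (wrongType : Option Int)
    (st : Sum (List (List Bool)) ((List (List Bool)) × List (Int × Int) × Int))
    (nb : Int × Int) : Sum (List (List Bool)) ((List (List Bool)) × List (Int × Int) × Int) :=
  match st with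
  | .inl v => .inl v
  | .inr (v, s, c) =>
    if check_in_bounds grid nb.1 nb.2 && !(vget v nb.1 nb.2) then
      if gval grid nb.1 nb.2 == cellType then .inr (vset v nb.1 nb.2, nb :: s, c + 1)
      else if wrongType.isSome && (some (gval grid nb.1 nb.2) == wrongType) then .inl v
      else .inr (v, s, c)
    else .inr (v, s, c)

-- the while loop; the stack's top (Python's list end) is the Lean list's head; fuel only makes the
-- recursion structural — at the fuel passed below it is proved never to run out
def floodLoopA (grid : List (List Int)) (cellType : Int) (wrongType : Option Int) :
    Nat → List (List Bool) → List (Int × Int) → Int → (List (List Bool)) × Int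
  | 0, v, _, c => (v, c)
  | f + 1, v, s, c =>
    match s with
    | [] => (v, c)
    | p :: rest =>
      match (get_neighbours p.1 p.2).foldl (neighbourStepA grid cellType wrongType)
          (.inr (v, rest, c)) with
      | .inl v' => (v', -1)
      | .inr (v', s', c') => floodLoopA grid cellType wrongType f v' s' c'

def flood_fill_island_count (grid : List (List Int)) (x y : Int) (visited : List (List Bool))
    (cellType : Int) (wrongType : Option Int) : (List (List Bool)) × Int :=
  floodLoopA grid cellType wrongType (2 * grid.length * grid.headI.length + 1)
    (vset visited x y) [(x, y)] 1

-- inner 'for j in range(len(grid[0]))'; none = 'return False' was taken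
def scanColsA (grid : List (List Int)) (i : Int) :
    List Int → List (List Bool) → Option (List (List Bool))
  | [], v => some v
  | j :: js, v =>
    if gval grid i j > 0 && !(vget v i j) then
      let r := flood_fill_island_count grid i j v 0 none
      if r.2 ≠ gval grid i j then none else scanColsA grid i js r.1
    else scanColsA grid i js v

def scanRowsA (grid : List (List Int)) : List Int → List (List Bool) → Bool
  | [], _ => true
  | i :: is, v =>
    match scanColsA grid i (PySem.List.pyRange 0 (grid.headI.length : Int) 1) v with
    | none => false
    | some v' => scanRowsA grid is v'

def correct_island_size (grid : List (List Int)) : Bool :=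
  let visited := (PySem.List.pyRange 0 (grid.length : Int) 1).map
    (fun _ => (PySem.List.pyRange 0 (grid.headI.length : Int) 1).map (fun _ => false))
  scanRowsA grid (PySem.List.pyRange 0 (grid.length : Int) 1) visited

-- ===== PORT B =====
def neighboursB (x y : Int) : List (Int × Int) :=
  [(x, y - 1), (x, y + 1), (x - 1, y), (x + 1, y)]

def in_bounds_alt (grid : List (List Int)) (x y : Int) : Bool :=
  decide (0 ≤ x) && decide (x < (grid.length : Int)) && decide (0 ≤ y) &&
    decide (y < (grid.headI.length : Int))

-- 'claim every eligible neighbour' loop body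
def claimStepB (grid : List (List Int)) (st : (List (List Bool)) × List (Int × Int))
    (nb : Int × Int) : (List (List Bool)) × List (Int × Int) :=
  if in_bounds_alt grid nb.1 nb.2 && !(vget st.1 nb.1 nb.2) && (gval grid nb.1 nb.2 == 0) then
    (vset st.1 nb.1 nb.2, st.2 ++ [nb])
  else st

-- recursive flood; fuel only makes the recursion structural — at the fuel passed below it is
-- proved never to run out
def floodB (grid : List (List Int)) : Nat → List (List Bool) → Int → Int → (List (List Bool)) × Int
  | 0, v, _, _ => (v, 0)
  | f + 1, v, x, y =>
    let step := (neighboursB x y).foldl (claimStepB grid) (v, [])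
    step.2.foldl
      (fun (st : (List (List Bool)) × Int) cell =>
        let r := floodB grid f st.1 cell.1 cell.2
        (r.1, st.2 + r.2))
      (step.1, (step.2.length : Int))

def scanColsB (grid : List (List Int)) (i : Int) :
    List Int → List (List Bool) → Option (List (List Bool))
  | [], v => some v
  | j :: js, v =>
    if gval grid i j > 0 && !(vget v i j) then
      let v' := vset v i j
      let r := floodB grid (grid.length * grid.headI.length + 1) v' i j
      if 1 + r.2 ≠ gval grid i j then none else scanColsB grid i js r.1
    else scanColsB grid i js v

def scanRowsB (grid : List (List Int)) : List Int → List (List Bool) → Bool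
  | [], _ => true
  | i :: is, v =>
    match scanColsB grid i (PySem.List.pyRange 0 (grid.headI.length : Int) 1) v with
    | none => false
    | some v' => scanRowsB grid is v'

def correct_island_size_alt (grid : List (List Int)) : Bool :=
  let visited := (PySem.List.pyRange 0 (grid.length : Int) 1).map
    (fun _ => List.replicate grid.headI.length false)
  scanRowsB grid (PySem.List.pyRange 0 (grid.length : Int) 1) visited

-- ===== PRECONDITION & SPEC =====
-- Pre_ excludes (1) the empty grid, where A returns True only because its comprehensions never
-- evaluate grid[0] while B's 'cols = len(grid[0])' raises IndexError, and (2) grids with a row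
-- shorter than the first row, where the programs raise IndexError (every row is subscripted at all
-- columns of range(len(grid[0]))) except when an island mismatch happens to return False first —
-- an accident of scan order excluded wholesale.
def Pre_correct_island_size (grid : List (List Int)) : Prop :=
  grid ≠ [] ∧ ∀ r ∈ grid, grid.headI.length ≤ r.length
instance (grid : List (List Int)) : Decidable (Pre_correct_island_size grid) := by
  unfold Pre_correct_island_size; infer_instance

def pvWitness_correct_island_size : List (List Int) := [[1, 0], [0, 2]]

def Spec_correct_island_size (grid : List (List Int)) (out : Bool) : Prop :=
  out = correct_island_size_alt grid
instance (grid : List (List Int)) (out : Bool) : Decidable (Spec_correct_island_size grid out) := by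
  unfold Spec_correct_island_size; infer_instance

-- ===== CLAIM (what is proved, stated in full; the proofs are below) =====
def Claim_equal_correct_island_size : Prop := ∀ (grid : List (List Int)),
  Dom_correct_island_size grid → Pre_correct_island_size grid →
    Spec_correct_island_size grid (correct_island_size grid)

-- ===== LEMMAS AND PROOFS =====

-- eligibility of a neighbour cell: in bounds, unvisited, water (the condition both loops test)
def elig (grid : List (List Int)) (v : List (List Bool)) (nb : Int × Int) : Bool :=
  check_in_bounds grid nb.1 nb.2 && !(vget v nb.1 nb.2) && (gval grid nb.1 nb.2 == 0)

def filt (grid : List (List Int)) (v : List (List Bool)) (ns : List (Int × Int)) :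
    List (Int × Int) := ns.filter (elig grid v)

def markList (v : List (List Bool)) (l : List (Int × Int)) : List (List Bool) :=
  l.foldl (fun w nb => vset w nb.1 nb.2) v

-- number of unvisited cells
def fc (v : List (List Bool)) : Nat := (v.map (fun r => r.countP (fun b => !b))).sum

def ShapeV (grid : List (List Int)) (v : List (List Bool)) : Prop :=
  v.length = grid.length ∧ ∀ r ∈ v, r.length = grid.headI.length

-- B's flood folded over a list of seed cells, accumulating visited and a count
def runB (grid : List (List Int)) (F : Nat) (l : List (Int × Int))
    (st : (List (List Bool)) × Int) : (List (List Bool)) × Int :=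
  l.foldl (fun st cell =>
    let r := floodB grid F st.1 cell.1 cell.2
    (r.1, st.2 + r.2)) st

theorem vget_nonneg (v : List (List Bool)) (x y : Int) (hx : 0 ≤ x) (hy : 0 ≤ y) :
    vget v x y = ((v[x.toNat]?).bind (fun r => r[y.toNat]?)).getD false := by
  simp [vget, PySem.List.pyGet?_of_nonneg _ hx]
  congr 1
  rcases v[x.toNat]? with _ | r
  · rfl
  · simp [PySem.List.pyGet?_of_nonneg _ hy]

theorem vget_vset_ne (v : List (List Bool)) (a b x y : Int) (ha : 0 ≤ a) (hb : 0 ≤ b)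
    (hx : 0 ≤ x) (hy : 0 ≤ y) (hne : (x, y) ≠ (a, b)) :
    vget (vset v a b) x y = vget v x y := by
  rw [vget_nonneg _ _ _ hx hy, vget_nonneg _ _ _ hx hy]
  simp only [vset, List.getElem?_modify]
  by_cases hr : a.toNat = x.toNat
  · have hax : a = x := by omega
    have hby : b ≠ y := by rintro rfl; exact hne (by rw [hax])
    rw [hr]
    rcases hv : v[x.toNat]? with _ | r
    · rfl
    · simp [List.getElem?_set_ne (by omega : b.toNat ≠ y.toNat)]
  · simp [hr]

theorem vset_comm (v : List (List Bool)) (a b x y : Int) (ha : 0 ≤ a) (hb : 0 ≤ b)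
    (hx : 0 ≤ x) (hy : 0 ≤ y) (hne : (x, y) ≠ (a, b)) :
    vset (vset v a b) x y = vset (vset v x y) a b := by
  apply List.ext_getElem?
  intro i
  simp only [vset, List.getElem?_modify]
  by_cases h1 : a.toNat = i <;> by_cases h2 : x.toNat = i <;>
      rcases hv : v[i]? with _ | r <;> simp [h1, h2]
  have hax : a = x := by omega
  have hby : b ≠ y := by rintro rfl; exact hne (by rw [hax])
  exact List.set_comm _ _ (by omega)

theorem fc_cons (r : List Bool) (t : List (List Bool)) :
    fc (r :: t) = r.countP (fun b => !b) + fc t := by simp [fc]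

theorem fc_vset_raw : ∀ (v : List (List Bool)) (n m : Nat),
    (hn : n < v.length) → (hm : m < v[n].length) → v[n][m] = false →
    fc (v.modify n (fun r => r.set m true)) + 1 = fc v := by
  intro v
  induction v with
  | nil => intro n m hn; simp at hn
  | cons r t ih =>
    intro n m hn hm hv
    cases n with
    | zero =>
      rw [fc_cons, show ((r :: t).modify 0 fun r => r.set m true) = (r.set m true) :: t by
        simp [List.modify_cons], fc_cons]
      have hv' : r[m] = false := by simpa using hv
      have hpos : 0 < r.countP (fun b => !b) := by
        rw [List.countP_pos_iff]
        exact ⟨false, List.mem_of_getElem hv', rfl⟩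
      have := List.countP_set (p := fun b => !b) (l := r) (i := m) (a := true) hm
      rw [this, hv']
      simp
      omega
    | succ k =>
      rw [fc_cons, show ((r :: t).modify (k+1) fun r => r.set m true)
          = r :: (t.modify k fun r => r.set m true) by simp, fc_cons]
      have := ih k m (by simpa using hn) (by simpa using hm) (by simpa using hv)
      omega

theorem fc_vset_le_raw : ∀ (v : List (List Bool)) (n m : Nat),
    fc (v.modify n (fun r => r.set m true)) ≤ fc v := by
  intro v
  induction v with
  | nil => intro n m; simp [fc]
  | cons r t ih =>
    intro n m
    cases n with
    | zero =>
      rw [fc_cons, show ((r :: t).modify 0 fun r => r.set m true) = (r.set m true) :: t by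
        simp [List.modify_cons], fc_cons]
      have : (r.set m true).countP (fun b => !b) ≤ r.countP (fun b => !b) := by
        by_cases hm : m < r.length
        · have := List.countP_set (p := fun b => !b) (l := r) (i := m) (a := true) hm
          have z : (if (!true) = true then 1 else 0) = 0 := by simp
          rw [this, z]; omega
        · rw [List.set_eq_of_length_le (by omega)]
      omega
    | succ k =>
      rw [fc_cons, show ((r :: t).modify (k+1) fun r => r.set m true)
          = r :: (t.modify k fun r => r.set m true) by simp, fc_cons]
      have := ih k m
      omega

theorem fc_vset_le (v : List (List Bool)) (x y : Int) : fc (vset v x y) ≤ fc v :=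
  fc_vset_le_raw v x.toNat y.toNat

theorem fc_le_raw : ∀ (v : List (List Bool)) (c : Nat),
    (∀ r ∈ v, r.length = c) → fc v ≤ v.length * c := by
  intro v
  induction v with
  | nil => intro c _; simp [fc]
  | cons r t ih =>
    intro c hs
    rw [fc_cons]
    have h1 : r.countP (fun b => !b) ≤ c := by
      have := List.countP_le_length (p := fun b => !b) (l := r)
      rw [hs r (by simp)] at this
      exact this
    have := ih c (fun q hq => hs q (by simp [hq]))
    simp [List.length_cons]
    calc r.countP (fun b => !b) + fc t ≤ c + t.length * c := by omega
    _ = (t.length + 1) * c := by ring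

theorem fc_le (grid : List (List Int)) (v : List (List Bool)) (hs : ShapeV grid v) :
    fc v ≤ grid.length * grid.headI.length := by
  have := fc_le_raw v grid.headI.length hs.2
  rw [hs.1] at this
  exact this

theorem shape_vset (grid : List (List Int)) (v : List (List Bool)) (x y : Int)
    (h : ShapeV grid v) : ShapeV grid (vset v x y) := by
  refine ⟨by simp [vset, h.1], ?_⟩
  intro r hr
  rw [List.mem_iff_getElem] at hr
  obtain ⟨i, hi, rfl⟩ := hr
  simp only [vset]
  rw [List.getElem_modify]
  split_ifs with he
  · rw [List.length_set]
    exact h.2 _ (by rw [vset, List.length_modify] at hi; exact List.getElem_mem hi)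
  · exact h.2 _ (by rw [vset, List.length_modify] at hi; exact List.getElem_mem hi)

theorem check_nonneg (grid : List (List Int)) (x y : Int)
    (h : check_in_bounds grid x y = true) :
    0 ≤ x ∧ 0 ≤ y ∧ x < (grid.length : Int) ∧ y < (grid.headI.length : Int) := by
  simp [check_in_bounds] at h
  tauto

theorem elig_nonneg (grid : List (List Int)) (v : List (List Bool)) (nb : Int × Int)
    (h : elig grid v nb = true) : 0 ≤ nb.1 ∧ 0 ≤ nb.2 := by
  simp only [elig, Bool.and_eq_true] at h
  have := check_nonneg grid nb.1 nb.2 h.1.1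
  exact ⟨this.1, this.2.1⟩

theorem elig_bounds (grid : List (List Int)) (v : List (List Bool)) (nb : Int × Int)
    (h : elig grid v nb = true) :
    0 ≤ nb.1 ∧ 0 ≤ nb.2 ∧ nb.1 < (grid.length : Int) ∧ nb.2 < (grid.headI.length : Int) := by
  simp only [elig, Bool.and_eq_true] at h
  have := check_nonneg grid nb.1 nb.2 h.1.1
  tauto

theorem elig_unvisited (grid : List (List Int)) (v : List (List Bool)) (nb : Int × Int)
    (h : elig grid v nb = true) : vget v nb.1 nb.2 = false := by
  simp only [elig, Bool.and_eq_true, Bool.not_eq_true'] at h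
  exact h.1.2

theorem elig_vset_ne (grid : List (List Int)) (v : List (List Bool)) (a b : Int) (nb : Int × Int)
    (ha : 0 ≤ a) (hb : 0 ≤ b) (hne : nb ≠ (a, b)) :
    elig grid (vset v a b) nb = elig grid v nb := by
  by_cases hcb : check_in_bounds grid nb.1 nb.2 = true
  · have := check_nonneg grid nb.1 nb.2 hcb
    unfold elig
    rw [vget_vset_ne v a b nb.1 nb.2 ha hb this.1 this.2.1 (by simpa using hne)]
  · unfold elig
    rw [Bool.eq_false_iff.mpr hcb]
    simp

theorem fc_vset (grid : List (List Int)) (v : List (List Bool)) (nb : Int × Int)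
    (hs : ShapeV grid v) (h : elig grid v nb = true) :
    fc (vset v nb.1 nb.2) + 1 = fc v := by
  obtain ⟨hb1, hb2, hb3, hb4⟩ := elig_bounds grid v nb h
  have hu := elig_unvisited grid v nb h
  have hlen := hs.1
  have h1 : nb.1.toNat < v.length := by omega
  have h2 : nb.2.toNat < v[nb.1.toNat].length := by
    rw [hs.2 _ (List.getElem_mem h1)]; omega
  apply fc_vset_raw v nb.1.toNat nb.2.toNat h1 h2
  rw [vget_nonneg _ _ _ hb1 hb2] at hu
  simp [List.getElem?_eq_getElem h1] at hu
  rw [List.getElem?_eq_getElem h2] at hu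
  simpa using hu

theorem nbrs_pairwise (x y : Int) : (get_neighbours x y).Pairwise (· ≠ ·) := by
  simp [get_neighbours, List.pairwise_cons, Prod.ext_iff]
  constructor
  · rintro a b (⟨rfl, rfl⟩ | ⟨rfl, rfl⟩ | ⟨rfl, rfl⟩) <;> omega
  constructor
  · rintro a b (⟨rfl, rfl⟩ | ⟨rfl, rfl⟩) <;> omega
  · omega

theorem stepA_spec (grid : List (List Int)) (v : List (List Bool)) (s : List (Int × Int)) (c : Int)
    (nb : Int × Int) :
    neighbourStepA grid 0 none (.inr (v, s, c)) nb =
      .inr (if elig grid v nb then (vset v nb.1 nb.2, nb :: s, c + 1) else (v, s, c)) := by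
  by_cases h1 : (check_in_bounds grid nb.1 nb.2 && !(vget v nb.1 nb.2)) = true <;>
    by_cases h2 : (gval grid nb.1 nb.2 == 0) = true <;>
      simp [neighbourStepA, elig, h1, h2]

theorem foldA_eq (grid : List (List Int)) (ns : List (Int × Int)) (hp : ns.Pairwise (· ≠ ·)) :
    ∀ (v : List (List Bool)) (s : List (Int × Int)) (c : Int),
    ns.foldl (neighbourStepA grid 0 none) (.inr (v, s, c)) =
      .inr (markList v (filt grid v ns), (filt grid v ns).reverse ++ s,
        c + ((filt grid v ns).length : Int)) := by
  induction ns with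
  | nil => intro v s c; simp [filt, markList]
  | cons n t ih =>
    rw [List.pairwise_cons] at hp
    intro v s c
    rw [List.foldl_cons, stepA_spec]
    by_cases he : elig grid v n = true
    · have hnn := elig_nonneg grid v n he
      have hfilt : filt grid (vset v n.1 n.2) t = filt grid v t := by
        apply List.filter_congr
        intro e hme
        exact elig_vset_ne grid v n.1 n.2 e hnn.1 hnn.2 (fun h => (hp.1 e hme) h.symm)
      have hfc : filt grid v (n :: t) = n :: filt grid v t := by
        simp [filt, he]
      rw [if_pos he, ih hp.2, hfilt, hfc]
      simp [markList]
      ring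
    · have hfc : filt grid v (n :: t) = filt grid v t := by
        simp [filt, he]
      rw [if_neg he, ih hp.2, hfc]

theorem in_bounds_alt_eq (grid : List (List Int)) (x y : Int) :
    in_bounds_alt grid x y = check_in_bounds grid x y := by
  rw [Bool.eq_iff_iff]
  simp [in_bounds_alt, check_in_bounds]
  tauto

theorem stepB_spec (grid : List (List Int)) (st : (List (List Bool)) × List (Int × Int))
    (nb : Int × Int) :
    claimStepB grid st nb =
      if elig grid st.1 nb then (vset st.1 nb.1 nb.2, st.2 ++ [nb]) else st := by
  simp only [claimStepB, in_bounds_alt_eq, elig]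
  rfl

theorem foldB_eq (grid : List (List Int)) (ns : List (Int × Int)) (hp : ns.Pairwise (· ≠ ·)) :
    ∀ (v : List (List Bool)) (acc : List (Int × Int)),
    ns.foldl (claimStepB grid) (v, acc) =
      (markList v (filt grid v ns), acc ++ filt grid v ns) := by
  induction ns with
  | nil => intro v acc; simp [filt, markList]
  | cons n t ih =>
    rw [List.pairwise_cons] at hp
    intro v acc
    rw [List.foldl_cons, stepB_spec]
    by_cases he : elig grid v n = true
    · have hnn := elig_nonneg grid v n he
      have hfilt : filt grid (vset v n.1 n.2) t = filt grid v t := by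
        apply List.filter_congr
        intro e hme
        exact elig_vset_ne grid v n.1 n.2 e hnn.1 hnn.2 (fun h => (hp.1 e hme) h.symm)
      have hfc : filt grid v (n :: t) = n :: filt grid v t := by
        simp [filt, he]
      rw [if_pos he, ih hp.2, hfilt, hfc]
      simp [markList]
    · have hfc : filt grid v (n :: t) = filt grid v t := by
        simp [filt, he]
      rw [if_neg he, ih hp.2, hfc]

theorem markList_cons_comm (v : List (List Bool)) (a : Int × Int) (l : List (Int × Int))
    (ha : 0 ≤ a.1 ∧ 0 ≤ a.2) (hl : ∀ e ∈ l, 0 ≤ e.1 ∧ 0 ≤ e.2) (hne : a ∉ l) :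
    markList (vset v a.1 a.2) l = vset (markList v l) a.1 a.2 := by
  induction l generalizing v with
  | nil => rfl
  | cons b t ih =>
    have hab : a ≠ b := fun h => hne (h ▸ List.mem_cons_self)
    have hbn := hl b List.mem_cons_self
    simp only [markList, List.foldl_cons]
    rw [show (vset (vset v a.1 a.2) b.1 b.2) = (vset (vset v b.1 b.2) a.1 a.2) from
      vset_comm v a.1 a.2 b.1 b.2 ha.1 ha.2 hbn.1 hbn.2 (by
        intro h
        exact hab h.symm)]
    exact ih (vset v b.1 b.2) (fun e he => hl e (List.mem_cons_of_mem _ he))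
      (fun h => hne (List.mem_cons_of_mem _ h))

theorem markList_reverse (v : List (List Bool)) (l : List (Int × Int))
    (hl : ∀ e ∈ l, 0 ≤ e.1 ∧ 0 ≤ e.2) (hp : l.Pairwise (· ≠ ·)) :
    markList v l.reverse = markList v l := by
  induction l generalizing v with
  | nil => rfl
  | cons a t ih =>
    rw [List.pairwise_cons] at hp
    have hna : a ∉ t := fun h => (hp.1 a h) rfl
    simp only [List.reverse_cons, markList, List.foldl_append, List.foldl_cons, List.foldl_nil]
    have := ih v (fun e he => hl e (List.mem_cons_of_mem _ he)) hp.2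
    simp only [markList] at this
    rw [this]
    have := markList_cons_comm v a t (hl a List.mem_cons_self)
      (fun e he => hl e (List.mem_cons_of_mem _ he)) hna
    simp only [markList] at this
    rw [this]

theorem neighboursB_rev (x y : Int) : neighboursB x y = (get_neighbours x y).reverse := by
  rfl

theorem filt_mem_elig (grid : List (List Int)) (v : List (List Bool)) (ns : List (Int × Int))
    (e : Int × Int) (h : e ∈ filt grid v ns) : elig grid v e = true := by
  exact (List.mem_filter.mp h).2

theorem fc_markList (grid : List (List Int)) (v : List (List Bool)) (E : List (Int × Int))
    (hs : ShapeV grid v) (hp : E.Pairwise (· ≠ ·)) (he : ∀ e ∈ E, elig grid v e = true) :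
    fc (markList v E) + E.length = fc v := by
  induction E generalizing v with
  | nil => simp [markList]
  | cons e t ih =>
    rw [List.pairwise_cons] at hp
    have he := he
    have hee := he e List.mem_cons_self
    have hnn := elig_nonneg grid v e hee
    have ht : ∀ q ∈ t, elig grid (vset v e.1 e.2) q = true := by
      intro q hq
      rw [elig_vset_ne grid v e.1 e.2 q hnn.1 hnn.2 (by
        intro h
        exact (hp.1 q hq) ((Prod.ext (congrArg Prod.fst h) (congrArg Prod.snd h))).symm)]
      exact he q (List.mem_cons_of_mem _ hq)
    have := ih (vset v e.1 e.2) (shape_vset grid v e.1 e.2 hs) hp.2 ht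
    have h2 := fc_vset grid v e hs hee
    simp only [markList, List.foldl_cons] at this ⊢
    simp only [List.length_cons]
    omega

theorem shape_markList (grid : List (List Int)) (E : List (Int × Int)) :
    ∀ (v : List (List Bool)), ShapeV grid v → ShapeV grid (markList v E) := by
  induction E with
  | nil => intro v h; exact h
  | cons e t ih =>
    intro v h
    simp only [markList, List.foldl_cons]
    exact ih (vset v e.1 e.2) (shape_vset grid v e.1 e.2 h)

theorem nbrsB_pairwise (x y : Int) : (neighboursB x y).Pairwise (· ≠ ·) := by
  rw [neighboursB_rev, List.pairwise_reverse]
  exact (nbrs_pairwise x y).imp (fun h => h.symm)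

theorem filt_pairwise (grid : List (List Int)) (v : List (List Bool)) (ns : List (Int × Int))
    (hp : ns.Pairwise (· ≠ ·)) : (filt grid v ns).Pairwise (· ≠ ·) :=
  hp.filter _

theorem filt_rev (grid : List (List Int)) (v : List (List Bool)) (ns : List (Int × Int)) :
    filt grid v ns.reverse = (filt grid v ns).reverse := by
  simp [filt, List.filter_reverse]

theorem floodB_succ (grid : List (List Int)) (f : Nat) (v : List (List Bool)) (x y : Int) :
    floodB grid (f + 1) v x y =
      runB grid f (filt grid v (get_neighbours x y).reverse)
        (markList v (filt grid v (get_neighbours x y).reverse),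
          ((filt grid v (get_neighbours x y).reverse).length : Int)) := by
  show ((neighboursB x y).foldl (claimStepB grid) (v, [])).2.foldl _
      (((neighboursB x y).foldl (claimStepB grid) (v, [])).1, _) = _
  rw [foldB_eq grid (neighboursB x y) (nbrsB_pairwise x y) v []]
  rw [neighboursB_rev]
  rfl

theorem fc_markList_le (E : List (Int × Int)) : ∀ (v : List (List Bool)),
    fc (markList v E) ≤ fc v := by
  induction E with
  | nil => intro v; simp [markList]
  | cons e t ih =>
    intro v
    simp only [markList, List.foldl_cons]
    exact le_trans (ih (vset v e.1 e.2)) (fc_vset_le v e.1 e.2)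

theorem shape_floodB (grid : List (List Int)) (f : Nat) :
    ∀ (v : List (List Bool)) (x y : Int), ShapeV grid v →
      ShapeV grid ((floodB grid f v x y).1) := by
  induction f with
  | zero => intro v x y hs; exact hs
  | succ f ih =>
    intro v x y hs
    rw [floodB_succ]
    have haux : ∀ (l : List (Int × Int)) (w : List (List Bool)) (c : Int), ShapeV grid w →
        ShapeV grid ((runB grid f l (w, c)).1) := by
      intro l
      induction l with
      | nil => intro w c hw; exact hw
      | cons p t iht =>
        intro w c hw
        simp only [runB, List.foldl_cons]
        exact iht _ _ (ih w p.1 p.2 hw)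
    exact haux _ _ _ (shape_markList grid _ v hs)

theorem fc_floodB_le (grid : List (List Int)) (f : Nat) :
    ∀ (v : List (List Bool)) (x y : Int), fc ((floodB grid f v x y).1) ≤ fc v := by
  induction f with
  | zero => intro v x y; simp [floodB]
  | succ f ih =>
    intro v x y
    rw [floodB_succ]
    have haux : ∀ (l : List (Int × Int)) (w : List (List Bool)) (c : Int),
        fc ((runB grid f l (w, c)).1) ≤ fc w := by
      intro l
      induction l with
      | nil => intro w c; exact le_refl _
      | cons p t iht =>
        intro w c
        simp only [runB, List.foldl_cons]
        exact le_trans (iht _ _) (ih w p.1 p.2)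
    exact le_trans (haux _ _ _) (fc_markList_le _ v)

theorem floodB_fuel_irrel (grid : List (List Int)) (n : Nat) :
    ∀ (v : List (List Bool)) (x y : Int) (f g : Nat), fc v ≤ n → ShapeV grid v →
      fc v < f → fc v < g → floodB grid f v x y = floodB grid g v x y := by
  induction n using Nat.strong_induction_on with
  | _ n ih =>
    intro v x y f g hn hs hf hg
    match f, g with
    | f + 1, g + 1 =>
      rw [floodB_succ, floodB_succ]
      set E := filt grid v (get_neighbours x y).reverse with hE
      have hpE : E.Pairwise (· ≠ ·) := filt_pairwise grid v _ ((List.pairwise_reverse).mpr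
        ((nbrs_pairwise x y).imp (fun h => h.symm)))
      have hall : ∀ e ∈ E, elig grid v e = true := fun e he => filt_mem_elig grid v _ e he
      rcases hEnil : E with _ | ⟨p, t⟩
      · rfl
      · have hfcE : fc (markList v E) + E.length = fc v := fc_markList grid v E hs hpE hall
        rw [← hEnil]
        have hlen : 0 < E.length := by rw [hEnil]; simp
        have hfc1 : fc (markList v E) < fc v := by omega
        have hshape1 : ShapeV grid (markList v E) := shape_markList grid E v hs
        have haux : ∀ (l : List (Int × Int)) (w : List (List Bool)) (c : Int), ShapeV grid w →
            fc w ≤ fc (markList v E) → runB grid f l (w, c) = runB grid g l (w, c) := by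
          intro l
          induction l with
          | nil => intro w c _ _; rfl
          | cons q t2 iht =>
            intro w c hw hwle
            simp only [runB, List.foldl_cons]
            have heq : floodB grid f w q.1 q.2 = floodB grid g w q.1 q.2 := by
              apply ih (fc w) (by omega) w q.1 q.2 f g (le_refl _) hw (by omega) (by omega)
            rw [heq]
            exact iht _ _ (shape_floodB grid g w q.1 q.2 hw)
              (le_trans (fc_floodB_le grid g w q.1 q.2) hwle)
        exact haux E (markList v E) _ hshape1 (le_refl _)

theorem runB_fuel_irrel (grid : List (List Int)) (l : List (Int × Int))
    (v : List (List Bool)) (c : Int) (f g : Nat) (hs : ShapeV grid v)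
    (hf : fc v < f) (hg : fc v < g) : runB grid f l (v, c) = runB grid g l (v, c) := by
  induction l generalizing v c with
  | nil => rfl
  | cons p t ih =>
    simp only [runB, List.foldl_cons]
    have heq : floodB grid f v p.1 p.2 = floodB grid g v p.1 p.2 :=
      floodB_fuel_irrel grid (fc v) v p.1 p.2 f g (le_refl _) hs hf hg
    rw [heq]
    have hs' := shape_floodB grid g v p.1 p.2 hs
    have hle := fc_floodB_le grid g v p.1 p.2
    exact ih _ _ hs' (by omega) (by omega)

theorem runB_add (grid : List (List Int)) (F : Nat) (l : List (Int × Int)) :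
    ∀ (v : List (List Bool)) (a b : Int),
      runB grid F l (v, a + b) = ((runB grid F l (v, b)).1, a + (runB grid F l (v, b)).2) := by
  induction l with
  | nil => intro v a b; rfl
  | cons p t ih =>
    intro v a b
    simp only [runB, List.foldl_cons]
    have := ih (floodB grid F v p.1 p.2).1 a (b + (floodB grid F v p.1 p.2).2)
    simp only [runB] at this
    rw [show a + b + (floodB grid F v p.1 p.2).2 = a + (b + (floodB grid F v p.1 p.2).2) by ring]
    exact this

-- the simulation: A's stack loop equals B's flood applied to each stack cell in pop order
theorem loopA_eq_runB (grid : List (List Int)) (f : Nat) :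
    ∀ (v : List (List Bool)) (S : List (Int × Int)) (c : Int) (FB : Nat), ShapeV grid v →
      2 * fc v + S.length ≤ f → fc v < FB →
      floodLoopA grid 0 none f v S c = runB grid FB S (v, c) := by
  induction f with
  | zero =>
    intro v S c FB hs hb hFB
    have : S = [] := by
      cases S with
      | nil => rfl
      | cons p t => simp at hb
    subst this
    rfl
  | succ f ih =>
    intro v S c FB hs hb hFB
    cases S with
    | nil => rfl
    | cons p rest =>
      have hstep : floodLoopA grid 0 none (f + 1) v (p :: rest) c =
          floodLoopA grid 0 none f (markList v (filt grid v (get_neighbours p.1 p.2)))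
            ((filt grid v (get_neighbours p.1 p.2)).reverse ++ rest)
            (c + ((filt grid v (get_neighbours p.1 p.2)).length : Int)) := by
        show (match (get_neighbours p.1 p.2).foldl (neighbourStepA grid 0 none)
            (.inr (v, rest, c)) with
          | .inl v' => (v', -1)
          | .inr (v', s', c') => floodLoopA grid 0 none f v' s' c') = _
        rw [foldA_eq grid _ (nbrs_pairwise p.1 p.2) v rest c]
      rw [hstep]
      set E := filt grid v (get_neighbours p.1 p.2) with hE
      have hpE : E.Pairwise (· ≠ ·) := filt_pairwise grid v _ (nbrs_pairwise p.1 p.2)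
      have hall : ∀ e ∈ E, elig grid v e = true := fun e he => filt_mem_elig grid v _ e he
      have hnnE : ∀ e ∈ E, 0 ≤ e.1 ∧ 0 ≤ e.2 := fun e he => elig_nonneg grid v e (hall e he)
      have hfcE : fc (markList v E) + E.length = fc v := fc_markList grid v E hs hpE hall
      have hs1 : ShapeV grid (markList v E) := shape_markList grid E v hs
      simp only [List.length_cons] at hb
      have hih := ih (markList v E) (E.reverse ++ rest) (c + (E.length : Int)) FB hs1
        (by simp; omega) (by omega)
      rw [hih]
      -- now compute the RHS one step
      show _ = runB grid FB rest ((floodB grid FB v p.1 p.2).1, c + (floodB grid FB v p.1 p.2).2)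
      cases FB with
      | zero => omega
      | succ fb =>
        have hflood : floodB grid (fb + 1) v p.1 p.2 =
            runB grid fb E.reverse (markList v E, (E.length : Int)) := by
          rw [floodB_succ, filt_rev, ← hE, markList_reverse v E hnnE hpE]
          simp
        have hfl2 : floodB grid (fb + 1) v p.1 p.2 =
            runB grid (fb + 1) E.reverse (markList v E, (E.length : Int)) := by
          by_cases hEnil : E = []
          · rw [hEnil] at hflood ⊢
            simp only [List.reverse_nil] at hflood ⊢
            rw [hflood]
            rfl
          · have hlen : 0 < E.length := List.length_pos_of_ne_nil hEnil
            rw [hflood]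
            exact runB_fuel_irrel grid E.reverse (markList v E) _ fb (fb + 1) hs1
              (by omega) (by omega)
        calc runB grid (fb + 1) (E.reverse ++ rest) (markList v E, c + (E.length : Int))
            = runB grid (fb + 1) rest
              (runB grid (fb + 1) E.reverse (markList v E, c + (E.length : Int))) := by
              simp [runB, List.foldl_append]
          _ = runB grid (fb + 1) rest
              ((runB grid (fb + 1) E.reverse (markList v E, (E.length : Int))).1,
                c + (runB grid (fb + 1) E.reverse (markList v E, (E.length : Int))).2) := by
              rw [runB_add]
          _ = runB grid (fb + 1) rest
              ((floodB grid (fb + 1) v p.1 p.2).1, c + (floodB grid (fb + 1) v p.1 p.2).2) := by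
              rw [hfl2]
          _ = runB grid (fb + 1) (p :: rest) (v, c) := by
              simp [runB]

theorem scanCols_eq (grid : List (List Int)) (i : Int) :
    ∀ (js : List Int) (v : List (List Bool)), ShapeV grid v →
      scanColsA grid i js v = scanColsB grid i js v ∧
      (∀ v', scanColsA grid i js v = some v' → ShapeV grid v') := by
  intro js
  induction js with
  | nil => intro v hs; exact ⟨rfl, fun v' h => by injection h with h; rw [← h]; exact hs⟩
  | cons j t ih =>
    intro v hs
    by_cases hc : (gval grid i j > 0 && !(vget v i j)) = true
    · have hA : scanColsA grid i (j :: t) v =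
          (let r := flood_fill_island_count grid i j v 0 none
           if r.2 ≠ gval grid i j then none else scanColsA grid i t r.1) := by
        simp only [scanColsA, hc, if_true]
      have hB : scanColsB grid i (j :: t) v =
          (let v' := vset v i j
           let r := floodB grid (grid.length * grid.headI.length + 1) v' i j
           if 1 + r.2 ≠ gval grid i j then none else scanColsB grid i t r.1) := by
        simp only [scanColsB, hc, if_true]
      have hsv := shape_vset grid v i j hs
      have hfcv := fc_le grid (vset v i j) hsv
      have hloop : flood_fill_island_count grid i j v 0 none =
          runB grid (grid.length * grid.headI.length + 1) [(i, j)] (vset v i j, 1) := by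
        unfold flood_fill_island_count
        apply loopA_eq_runB grid _ (vset v i j) [(i, j)] 1
          (grid.length * grid.headI.length + 1) hsv
        · have h1 := fc_vset_le v i j
          have h2 := fc_le grid v hs
          rw [Nat.mul_assoc]
          simp
          omega
        · omega
      have hrun : runB grid (grid.length * grid.headI.length + 1) [(i, j)] (vset v i j, 1) =
          ((floodB grid (grid.length * grid.headI.length + 1) (vset v i j) i j).1,
            1 + (floodB grid (grid.length * grid.headI.length + 1) (vset v i j) i j).2) := by
        rfl
      rw [hA, hB]
      simp only [hloop, hrun]
      have hshape' : ShapeV grid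
          ((floodB grid (grid.length * grid.headI.length + 1) (vset v i j) i j).1) :=
        shape_floodB grid _ _ i j hsv
      constructor
      · split_ifs with hne
        · rfl
        · exact (ih _ hshape').1
      · intro v' h
        split_ifs at h with hne
        · exact (ih _ hshape').2 v' h
    · have hA : scanColsA grid i (j :: t) v = scanColsA grid i t v := by
        simp [scanColsA, hc]
      have hB : scanColsB grid i (j :: t) v = scanColsB grid i t v := by
        simp [scanColsB, hc]
      rw [hA, hB]
      exact ih v hs

theorem scanRows_eq (grid : List (List Int)) :
    ∀ (is : List Int) (v : List (List Bool)), ShapeV grid v →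
      scanRowsA grid is v = scanRowsB grid is v := by
  intro is
  induction is with
  | nil => intro v _; rfl
  | cons i t ih =>
    intro v hs
    have h := scanCols_eq grid i (PySem.List.pyRange 0 (grid.headI.length : Int) 1) v hs
    simp only [scanRowsA, scanRowsB, ← h.1]
    cases hcc : scanColsA grid i (PySem.List.pyRange 0 (grid.headI.length : Int) 1) v with
    | none => rfl
    | some v' => exact ih v' (h.2 v' hcc)

theorem init_visited_eq (n : Nat) :
    (PySem.List.pyRange 0 (n : Int) 1).map (fun _ => false) = List.replicate n false := by
  rw [PySem.List.pyRange_one]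
  rw [List.eq_replicate_iff]
  constructor
  · simp
  · intro b hb
    simp at hb
    tauto

-- ===== VERDICT (by name: the statement is the Claim_ definition above) =====
theorem correct_island_size_spec : Claim_equal_correct_island_size := by
  intro grid _ _
  unfold Spec_correct_island_size correct_island_size correct_island_size_alt
  rw [init_visited_eq]
  apply scanRows_eq
  constructor
  · simp [PySem.List.pyRange_one]
  · intro r hr
    simp at hr
    obtain ⟨_, _, rfl⟩ := hr
    simp
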